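-- pv_equiv track=rewrite | github.com/aasthashiva/log-analyzer | analyzer.py | parse_in_parts
-- ===== SOURCE A (Python) =====
-- def parse_in_parts(parts):
--     is_error="ERROR" in parts
--     is_warn="WARN" in parts
--     is_info="INFO" in parts
--     latency=None
--     for part in parts:
--         if part.startswith("latency="):
--             latency=int(part.split("=")[1])
--             break
--     return latency, is_error, is_warn, is_info
-- ===== SOURCE B (Python) =====
-- def parse_in_parts(parts):
--     latency = None
--     found = False
--     is_error = is_warn = is_info = False
--     for part in parts:
--         if part == "ERROR":
--             is_error = True
--         elif part == "WARN":
--             is_warn = True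
--         elif part == "INFO":
--             is_info = True
--         elif not found and part.startswith("latency="):
--             latency = int(part.split("=")[1])
--             found = True
--     return latency, is_error, is_warn, is_info
-- ===== Notes on version B (the rewrite author's own statement) =====
-- stated objective: simpler
-- what changed: B replaces A's three separate membership scans plus a separate break-on-first-match loop by one single pass over parts that sets each flag and parses the first latency= part, guarded by a found flag.
import Mathlib
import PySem

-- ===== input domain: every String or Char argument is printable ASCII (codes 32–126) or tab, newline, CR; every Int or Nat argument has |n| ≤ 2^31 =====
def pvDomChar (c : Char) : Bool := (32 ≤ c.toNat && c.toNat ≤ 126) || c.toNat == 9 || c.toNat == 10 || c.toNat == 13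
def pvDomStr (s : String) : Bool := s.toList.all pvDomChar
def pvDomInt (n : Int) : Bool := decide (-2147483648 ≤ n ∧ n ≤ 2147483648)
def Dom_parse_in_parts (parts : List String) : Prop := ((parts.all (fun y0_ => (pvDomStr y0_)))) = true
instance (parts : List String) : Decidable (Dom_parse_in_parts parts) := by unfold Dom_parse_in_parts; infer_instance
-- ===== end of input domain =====

-- B does the same extraction in ONE pass (flags + first latency) instead of A's three membership scans plus a break loop; same value everywhere A returns.

-- ===== PORT A =====
-- the break loop of A: return on the FIRST part starting with "latency="
-- (where Python's int(...) raises ValueError, ofStr? is none — such inputs are outside Pre_)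
def pvLatLoopA : List String → Option Int
  | [] => none
  | p :: rest =>
    if PySem.Str.startswith p "latency=" then
      PySem.Int.ofStr? ((PySem.List.pyGet? ((PySem.Str.split? p "=").getD []) 1).getD "")
    else pvLatLoopA rest

def parse_in_parts (parts : List String) : Option Int × Bool × Bool × Bool :=
  let is_error := parts.contains "ERROR"
  let is_warn := parts.contains "WARN"
  let is_info := parts.contains "INFO"
  (pvLatLoopA parts, is_error, is_warn, is_info)

-- ===== PORT B =====
-- Source B's single loop, state = (latency, found, is_error, is_warn, is_info)
-- (where Python's int(...) raises ValueError, ofStr? is none — such inputs are outside Pre_)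
def pvLoopB : List String → Option Int → Bool → Bool → Bool → Bool → Option Int × Bool × Bool × Bool
  | [], latency, _, e, w, i => (latency, e, w, i)
  | p :: rest, latency, found, e, w, i =>
    if p = "ERROR" then pvLoopB rest latency found true w i
    else if p = "WARN" then pvLoopB rest latency found e true i
    else if p = "INFO" then pvLoopB rest latency found e w true
    else if !found && PySem.Str.startswith p "latency=" then
      pvLoopB rest (PySem.Int.ofStr? ((PySem.List.pyGet? ((PySem.Str.split? p "=").getD []) 1).getD "")) true e w i
    else pvLoopB rest latency found e w i

def parse_in_parts_alt (parts : List String) : Option Int × Bool × Bool × Bool :=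
  pvLoopB parts none false false false false

-- ===== PRECONDITION & SPEC =====
-- Pre_ excludes exactly the inputs where Python A raises ValueError: those whose FIRST
-- "latency="-prefixed part does not parse as an int (B raises there too).
def Pre_parse_in_parts (parts : List String) : Prop :=
  (parts.find? (fun p => PySem.Str.startswith p "latency=")).all
    (fun p => (PySem.Int.ofStr? ((PySem.List.pyGet? ((PySem.Str.split? p "=").getD []) 1).getD "")).isSome) = true
instance (parts : List String) : Decidable (Pre_parse_in_parts parts) := by unfold Pre_parse_in_parts; infer_instance

def pvWitness_parse_in_parts : List String := ["ERROR", "latency=42", "INFO"]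

def Spec_parse_in_parts (parts : List String) (out : Option Int × Bool × Bool × Bool) : Prop := out = parse_in_parts_alt parts
instance (parts : List String) (out : Option Int × Bool × Bool × Bool) : Decidable (Spec_parse_in_parts parts out) := by unfold Spec_parse_in_parts; infer_instance

-- ===== CLAIM (what is proved, stated in full; the proofs are below) =====
def Claim_equal_parse_in_parts : Prop := ∀ (parts : List String), Dom_parse_in_parts parts → Pre_parse_in_parts parts → Spec_parse_in_parts parts (parse_in_parts parts)

-- ===== LEMMAS AND PROOFS =====

-- B's one-pass loop computes A's three membership scans and A's break loop at once
-- (invariant: before the first latency match, latency is still none).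
lemma pvLoopB_eq (parts : List String) : ∀ (l : Option Int) (found e w i : Bool),
    (found = false → l = none) →
    pvLoopB parts l found e w i =
      ((if found then l else pvLatLoopA parts),
        e || parts.contains "ERROR", w || parts.contains "WARN", i || parts.contains "INFO") := by
  induction parts with
  | nil =>
    intro l found e w i hl
    cases found with
    | true => simp [pvLoopB]
    | false => simp [pvLoopB, pvLatLoopA, hl rfl]
  | cons p rest ih =>
    intro l found e w i hl
    simp only [pvLoopB]
    by_cases h1 : p = "ERROR"
    · subst h1
      rw [if_pos rfl, ih l found true w i hl]
      cases found <;> simp [pvLatLoopA, List.contains_cons] <;> exact fun h => absurd h (by decide)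
    · rw [if_neg h1]
      by_cases h2 : p = "WARN"
      · subst h2
        rw [if_pos rfl, ih l found e true i hl]
        cases found <;> simp [pvLatLoopA, List.contains_cons] <;> exact fun h => absurd h (by decide)
      · rw [if_neg h2]
        by_cases h3 : p = "INFO"
        · subst h3
          rw [if_pos rfl, ih l found e w true hl]
          cases found <;> simp [pvLatLoopA, List.contains_cons] <;> exact fun h => absurd h (by decide)
        · rw [if_neg h3]
          by_cases h4 : (!found && PySem.Str.startswith p "latency=") = true
          · rw [if_pos h4,
              ih _ true e w i (by simp)]
            obtain ⟨hf, hs⟩ := by simpa using h4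
            simp [pvLatLoopA, hf, hs, List.contains_cons, Ne.symm h1, Ne.symm h2, Ne.symm h3]
          · rw [if_neg h4, ih l found e w i hl]
            by_cases hf : found
            · simp [hf, List.contains_cons, Ne.symm h1, Ne.symm h2, Ne.symm h3]
            · replace hf : found = false := by simpa using hf
              simp only [hf, Bool.not_false, Bool.true_and, Bool.not_eq_true] at h4
              simp at h4
              simp [pvLatLoopA, hf, h4, List.contains_cons, Ne.symm h1, Ne.symm h2, Ne.symm h3]

theorem parse_in_parts_spec : Claim_equal_parse_in_parts := by
  intro parts _ _
  show parse_in_parts parts = parse_in_parts_alt parts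
  simp [parse_in_parts, parse_in_parts_alt, pvLoopB_eq parts none false false false false (fun _ => rfl)]
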